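-- pv_equiv track=rewrite | github.com/VGIL77/topas_v2 | trainers/size_oracle.py | _fit_affine_int
-- ===== SOURCE A (Python) =====
-- from typing import List, Tuple, Dict, Optional, Union
--
-- def _fit_affine_int(demos_hw: List[Tuple[Tuple[int,int], Tuple[int,int]]],
--                     coef_range = range(-2,3), bias_range = range(-5,6)) -> Optional[Tuple[int,int,int,int,int,int]]:
--     """
--     Fit small-integer affine map:
--       Hout = a1*Hin + b1*Win + c1
--       Wout = a2*Hin + b2*Win + c2
--     Returns tuple (a1,b1,c1,a2,b2,c2) if exact for all demos, else None.
--     """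
--     if not demos_hw:
--         return None
--     Hin_vals = [h for (h,w),(_H,_W) in demos_hw]
--     Win_vals = [w for (h,w),(_H,_W) in demos_hw]
--     Hout_vals= [_H for (h,w),(_H,_W) in demos_hw]
--     Wout_vals= [_W for (h,w),(_H,_W) in demos_hw]
--
--     # Quick shortcut: if all outputs identical size, return constant map
--     if len(set(Hout_vals)) == 1 and len(set(Wout_vals)) == 1:
--         c1 = Hout_vals[0]; c2 = Wout_vals[0]
--         return (0,0,c1, 0,0,c2)
--
--     # Enumerate small integer coefficients
--     for a1 in coef_range:
--         for b1 in coef_range: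
--             for c1 in bias_range:
--                 okH = all(a1*hin + b1*win + c1 == hout
--                           for (hin,win), (hout,_) in demos_hw)
--                 if not okH:
--                     continue
--                 for a2 in coef_range:
--                     for b2 in coef_range:
--                         for c2 in bias_range:
--                             okW = all(a2*hin + b2*win + c2 == wout
--                                       for (hin,win), (_,wout) in demos_hw)
--                             if okW:
--                                 return (a1,b1,c1,a2,b2,c2)
--     return None
-- ===== SOURCE B (Python) =====
-- def _fit_affine_int(demos_hw, coef_range=range(-2, 3), bias_range=range(-5, 6)):
--     if not demos_hw:
--         return None
--     houts = [o[0] for _, o in demos_hw]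
--     wouts = [o[1] for _, o in demos_hw]
--     if len(set(houts)) == 1 and len(set(wouts)) == 1:
--         return (0, 0, houts[0], 0, 0, wouts[0])
--     (h0, w0), out0 = demos_hw[0]
--
--     def find(idx):
--         # For each (a,b) the bias is forced by the first demo: no bias loop needed.
--         for a in coef_range:
--             for b in coef_range:
--                 c = out0[idx] - a * h0 - b * w0
--                 if all(a * i[0] + b * i[1] + c == o[idx] for i, o in demos_hw) and c in bias_range:
--                     return (a, b, c)
--         return None
--
--     th = find(0)
--     tw = find(1)
--     if th is None or tw is None:
--         return None
--     return th + tw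
-- ===== Notes on version B (the rewrite author's own statement) =====
-- stated objective: faster
-- what changed: B decouples A's six-deep nested search into two independent three-level scans (H-fit, then W-fit) and, for each (a,b), computes the bias c forced by the first demo instead of looping over bias_range, then checks membership.
import Mathlib
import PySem

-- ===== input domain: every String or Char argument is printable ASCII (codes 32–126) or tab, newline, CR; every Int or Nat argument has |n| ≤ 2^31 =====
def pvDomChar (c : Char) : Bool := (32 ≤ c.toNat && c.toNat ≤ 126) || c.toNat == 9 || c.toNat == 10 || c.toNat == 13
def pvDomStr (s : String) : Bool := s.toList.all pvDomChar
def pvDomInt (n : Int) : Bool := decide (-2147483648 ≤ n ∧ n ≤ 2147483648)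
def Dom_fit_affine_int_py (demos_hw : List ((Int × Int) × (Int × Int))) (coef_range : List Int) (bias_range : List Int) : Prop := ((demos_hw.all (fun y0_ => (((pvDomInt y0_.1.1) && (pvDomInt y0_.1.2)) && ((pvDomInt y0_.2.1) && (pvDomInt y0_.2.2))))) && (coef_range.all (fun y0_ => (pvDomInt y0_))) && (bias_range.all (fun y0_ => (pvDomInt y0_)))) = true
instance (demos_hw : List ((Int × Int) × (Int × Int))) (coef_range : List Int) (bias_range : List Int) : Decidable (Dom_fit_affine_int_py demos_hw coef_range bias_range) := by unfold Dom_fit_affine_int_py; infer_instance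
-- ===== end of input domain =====

-- B decouples A's six-deep nested coefficient search into two independent three-deep
-- searches (H-fit then W-fit) and concatenates the results: an asymptotic speed-up.

-- ===== PORT A =====
-- okH / okW: the 'all(...)' generator checks of A
def pvOkH (demos_hw : List ((Int × Int) × (Int × Int))) (a1 b1 c1 : Int) : Bool :=
  demos_hw.all (fun d => a1 * d.1.1 + b1 * d.1.2 + c1 == d.2.1)

def pvOkW (demos_hw : List ((Int × Int) × (Int × Int))) (a2 b2 c2 : Int) : Bool :=
  demos_hw.all (fun d => a2 * d.1.1 + b2 * d.1.2 + c2 == d.2.2)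

def fit_affine_int_py (demos_hw : List ((Int × Int) × (Int × Int))) (coef_range : List Int) (bias_range : List Int) : Option (Int × Int × Int × Int × Int × Int) :=
  if demos_hw = [] then none
  else
    let Hout_vals := demos_hw.map (fun d => d.2.1)
    let Wout_vals := demos_hw.map (fun d => d.2.2)
    -- len(set(..)) == 1 shortcut; Hout_vals[0] is safe here since demos_hw ≠ []
    if (PySem.Set.ofList Hout_vals).length = 1 ∧ (PySem.Set.ofList Wout_vals).length = 1 then
      some (0, 0, Hout_vals.headD 0, 0, 0, Wout_vals.headD 0)
    else
      -- the six nested for-loops with early return; 'continue' = none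
      coef_range.findSome? fun a1 =>
        coef_range.findSome? fun b1 =>
          bias_range.findSome? fun c1 =>
            if pvOkH demos_hw a1 b1 c1 then
              coef_range.findSome? fun a2 =>
                coef_range.findSome? fun b2 =>
                  bias_range.findSome? fun c2 =>
                    if pvOkW demos_hw a2 b2 c2 then some (a1, b1, c1, a2, b2, c2)
                    else none
            else none

-- ===== PORT B =====
-- B's helper find(idx): for each (a,b) the bias c is forced by the first demo
def pvFindTriple (d0 : (Int × Int) × (Int × Int)) (demos_hw : List ((Int × Int) × (Int × Int))) (coef_range : List Int) (bias_range : List Int) (out : ((Int × Int) × (Int × Int)) → Int) : Option (Int × Int × Int) :=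
  coef_range.findSome? fun a =>
    coef_range.findSome? fun b =>
      -- c := out0[idx] - a*h0 - b*w0 (inlined)
      if (demos_hw.all (fun d => a * d.1.1 + b * d.1.2 + (out d0 - a * d0.1.1 - b * d0.1.2) == out d))
           && bias_range.contains (out d0 - a * d0.1.1 - b * d0.1.2)
      then some (a, b, out d0 - a * d0.1.1 - b * d0.1.2) else none

def fit_affine_int_py_alt (demos_hw : List ((Int × Int) × (Int × Int))) (coef_range : List Int) (bias_range : List Int) : Option (Int × Int × Int × Int × Int × Int) :=
  match demos_hw with
  | [] => none
  | d0 :: _ =>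
    if (PySem.Set.ofList (demos_hw.map (fun d => d.2.1))).length = 1 ∧
       (PySem.Set.ofList (demos_hw.map (fun d => d.2.2))).length = 1 then
      some (0, 0, d0.2.1, 0, 0, d0.2.2)
    else
      match pvFindTriple d0 demos_hw coef_range bias_range (fun d => d.2.1),
            pvFindTriple d0 demos_hw coef_range bias_range (fun d => d.2.2) with
      | some (a1, b1, c1), some (a2, b2, c2) => some (a1, b1, c1, a2, b2, c2)
      | _, _ => none

-- ===== PRECONDITION & SPEC =====
def Spec_fit_affine_int_py (demos_hw : List ((Int × Int) × (Int × Int))) (coef_range : List Int) (bias_range : List Int) (out : Option (Int × Int × Int × Int × Int × Int)) : Prop := out = fit_affine_int_py_alt demos_hw coef_range bias_range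
instance (demos_hw : List ((Int × Int) × (Int × Int))) (coef_range : List Int) (bias_range : List Int) (out : Option (Int × Int × Int × Int × Int × Int)) : Decidable (Spec_fit_affine_int_py demos_hw coef_range bias_range out) := by unfold Spec_fit_affine_int_py; infer_instance

-- ===== CLAIM (what is proved, stated in full; the proofs are below) =====
def Claim_equal_fit_affine_int_py : Prop := ∀ (demos_hw : List ((Int × Int) × (Int × Int))) (coef_range : List Int) (bias_range : List Int), Dom_fit_affine_int_py demos_hw coef_range bias_range → Spec_fit_affine_int_py demos_hw coef_range bias_range (fit_affine_int_py demos_hw coef_range bias_range)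

-- ===== LEMMAS AND PROOFS =====

-- findSome? of a function that only produces mapped values
theorem pv_findSome?_map_opt {α β γ : Type} (l : List α) (f : α → Option β) (g : β → γ) :
    l.findSome? (fun x => (f x).map g) = (l.findSome? f).map g := by
  induction l with
  | nil => rfl
  | cons x xs ih =>
    simp only [List.findSome?_cons]
    cases f x <;> simp [ih]

-- a first-hit scan whose success value is forced collapses to a membership test
theorem pv_findSome?_forced {γ : Type} (bias : List Int) (ok : Int → Bool) (cstar : Int)
    (payload : Int → γ) (h : ∀ c, ok c = true → c = cstar) :
    bias.findSome? (fun c => if ok c then some (payload c) else none)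
    = if ok cstar && bias.contains cstar then some (payload cstar) else none := by
  induction bias with
  | nil => simp
  | cons c cs ih =>
    simp only [List.findSome?_cons, List.contains_cons]
    cases hc : ok c with
    | true =>
      have := h c hc
      subst this
      simp [hc]
    | false =>
      by_cases hcc : c = cstar
      · subst hcc
        rw [hc]
        simpa [hc] using ih
      · have hcc' : ¬ cstar = c := fun e => hcc e.symm
        simpa [hcc'] using ih

-- A's triple-nested (a,b,c)-scan with a given payload is B's forced search, mapped
theorem pv_triple_eq {γ : Type} (d0 : (Int × Int) × (Int × Int))
    (rest : List ((Int × Int) × (Int × Int))) (coef bias : List Int)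
    (out : ((Int × Int) × (Int × Int)) → Int) (g : Int × Int × Int → γ) :
    (coef.findSome? fun a => coef.findSome? fun b => bias.findSome? fun c =>
        if (d0 :: rest).all (fun d => a * d.1.1 + b * d.1.2 + c == out d)
        then some (g (a, b, c)) else none)
    = (pvFindTriple d0 (d0 :: rest) coef bias out).map g := by
  unfold pvFindTriple
  rw [← pv_findSome?_map_opt]
  congr 1; funext a
  rw [← pv_findSome?_map_opt]
  congr 1; funext b
  rw [pv_findSome?_forced bias _ (out d0 - a * d0.1.1 - b * d0.1.2) (fun c => g (a, b, c))
      (by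
        intro c hc
        simp only [List.all_cons, Bool.and_eq_true, beq_iff_eq] at hc
        omega)]
  cases ((d0 :: rest).all
      (fun d => a * d.1.1 + b * d.1.2 + (out d0 - a * d0.1.1 - b * d0.1.2) == out d)
      && bias.contains (out d0 - a * d0.1.1 - b * d0.1.2)) <;> simp

-- A's six-deep nested search equals B's two decoupled forced searches combined
theorem pv_search_eq (d0 : (Int × Int) × (Int × Int)) (rest : List ((Int × Int) × (Int × Int)))
    (coef bias : List Int) :
    (coef.findSome? fun a1 => coef.findSome? fun b1 => bias.findSome? fun c1 =>
        if pvOkH (d0 :: rest) a1 b1 c1 then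
          coef.findSome? fun a2 => coef.findSome? fun b2 => bias.findSome? fun c2 =>
            if pvOkW (d0 :: rest) a2 b2 c2 then some (a1, b1, c1, a2, b2, c2) else none
        else none)
    = match pvFindTriple d0 (d0 :: rest) coef bias (fun d => d.2.1),
            pvFindTriple d0 (d0 :: rest) coef bias (fun d => d.2.2) with
      | some (a1, b1, c1), some (a2, b2, c2) => some (a1, b1, c1, a2, b2, c2)
      | _, _ => none := by
  have hW : ∀ a1 b1 c1 : Int,
      (coef.findSome? fun a2 => coef.findSome? fun b2 => bias.findSome? fun c2 =>
          if pvOkW (d0 :: rest) a2 b2 c2 then some (a1, b1, c1, a2, b2, c2) else none)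
      = (pvFindTriple d0 (d0 :: rest) coef bias (fun d => d.2.2)).map
          (fun t => (a1, b1, c1, t.1, t.2.1, t.2.2)) := by
    intro a1 b1 c1
    have := pv_triple_eq d0 rest coef bias (fun d => d.2.2)
      (fun t => (a1, b1, c1, t.1, t.2.1, t.2.2))
    simp only [pvOkW]
    exact this
  simp only [hW]
  cases hFW : pvFindTriple d0 (d0 :: rest) coef bias (fun d => d.2.2) with
  | none =>
    have hz : (coef.findSome? fun a1 => coef.findSome? fun b1 => bias.findSome? fun c1 =>
        if pvOkH (d0 :: rest) a1 b1 c1 then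
          (Option.map (fun (t : Int × Int × Int) => (a1, b1, c1, t.1, t.2.1, t.2.2)) none :
            Option (Int × Int × Int × Int × Int × Int))
        else none) = none := by
      have : ∀ l : List Int,
          l.findSome? (fun _ : Int => (none : Option (Int × Int × Int × Int × Int × Int))) = none := by
        intro l; induction l with
        | nil => rfl
        | cons x xs ih => simp [ih]
      simp [this]
    rw [hz]
    cases pvFindTriple d0 (d0 :: rest) coef bias (fun d => d.2.1) with
    | none => rfl
    | some t1 => obtain ⟨a1, b1, c1⟩ := t1; rfl
  | some t2 =>
    obtain ⟨a2, b2, c2⟩ := t2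
    have h2 : (coef.findSome? fun a1 => coef.findSome? fun b1 => bias.findSome? fun c1 =>
        if pvOkH (d0 :: rest) a1 b1 c1 then
          (Option.map (fun (t : Int × Int × Int) => (a1, b1, c1, t.1, t.2.1, t.2.2))
            (some (a2, b2, c2)) : Option (Int × Int × Int × Int × Int × Int))
        else none)
        = (pvFindTriple d0 (d0 :: rest) coef bias (fun d => d.2.1)).map
            (fun t => (t.1, t.2.1, t.2.2, a2, b2, c2)) := by
      have := pv_triple_eq d0 rest coef bias (fun d => d.2.1)
        (fun t => (t.1, t.2.1, t.2.2, a2, b2, c2))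
      simp only [pvOkH]
      exact this
    rw [h2]
    cases pvFindTriple d0 (d0 :: rest) coef bias (fun d => d.2.1) with
    | none => rfl
    | some t1 => obtain ⟨a1, b1, c1⟩ := t1; rfl

-- ===== VERDICT (by name: the statement is the Claim_ definition above) =====
theorem fit_affine_int_py_spec : Claim_equal_fit_affine_int_py := by
  intro demos coef bias _
  unfold Spec_fit_affine_int_py
  cases demos with
  | nil => rfl
  | cons d0 rest =>
    unfold fit_affine_int_py fit_affine_int_py_alt
    simp only [List.cons_ne_nil, if_false, List.map_cons, List.headD_cons]
    split_ifs with h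
    · rfl
    · exact pv_search_eq d0 rest coef bias
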